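-- pv_equiv track=rewrite | github.com/oh-ari/Advent-of-Code | Advent of Code [24]/Day 8/antenna.py | antinodes_part2
-- ===== SOURCE A (Python) =====
-- def collinear(p1, p2, p3):
--     # check if points make line
--     return (p2[1]-p1[1])*(p3[0]-p2[0]) == (p3[1]-p2[1])*(p2[0]-p1[0])
--
-- def antinodes_part2(grid, antennas):
--     antinodes = set()
--
--     # find all collinear points
--     for positions in antennas.values():
--         if len(positions) < 2: continue
--         for y in range(len(grid)):
--             for x in range(len(grid[0])):
--                 for i, p1 in enumerate(positions):
--                     if any(collinear(p1, p2, (x,y))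
--                           for p2 in positions[i+1:]):
--                         antinodes.add((x,y))
--                         break
--     return len(antinodes)
-- ===== SOURCE B (Python) =====
-- from math import gcd
--
-- def antinodes_part2(grid, antennas):
--     # Per antenna pair, walk the grid columns (or rows) along the reduced
--     # direction instead of testing every grid cell against every pair.
--     H = len(grid)
--     W = len(grid[0]) if H else 0
--     marked = set()
--     for positions in antennas.values():
--         n = len(positions)
--         for i in range(n):
--             p1 = positions[i]
--             for j in range(i + 1, n):
--                 p2 = positions[j]
--                 dx = p2[0] - p1[0]
--                 dy = p2[1] - p1[1]
--                 if dx == 0 and dy == 0: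
--                     # degenerate pair: every cell is collinear with it
--                     for y in range(H):
--                         for x in range(W):
--                             marked.add((x, y))
--                 elif dx == 0:
--                     # vertical line x = p2[0]
--                     if 0 <= p2[0] < W:
--                         for y in range(H):
--                             marked.add((p2[0], y))
--                 else:
--                     g = gcd(abs(dx), abs(dy))
--                     sx = dx // g
--                     sy = dy // g
--                     for x in range(W):
--                         r = x - p2[0]
--                         if r % sx == 0:
--                             y = p2[1] + (r // sx) * sy
--                             if 0 <= y < H:
--                                 marked.add((x, y))
--     return len(marked)
-- ===== Notes on version B (the rewrite author's own statement) =====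
-- stated objective: faster
-- what changed: A tests every grid cell against every antenna pair per frequency; B instead, for each antenna pair, walks only the grid columns (or rows) of the pair's reduced (gcd) direction line, marking the cells it passes, so the W*H cell scan disappears.
import Mathlib
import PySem

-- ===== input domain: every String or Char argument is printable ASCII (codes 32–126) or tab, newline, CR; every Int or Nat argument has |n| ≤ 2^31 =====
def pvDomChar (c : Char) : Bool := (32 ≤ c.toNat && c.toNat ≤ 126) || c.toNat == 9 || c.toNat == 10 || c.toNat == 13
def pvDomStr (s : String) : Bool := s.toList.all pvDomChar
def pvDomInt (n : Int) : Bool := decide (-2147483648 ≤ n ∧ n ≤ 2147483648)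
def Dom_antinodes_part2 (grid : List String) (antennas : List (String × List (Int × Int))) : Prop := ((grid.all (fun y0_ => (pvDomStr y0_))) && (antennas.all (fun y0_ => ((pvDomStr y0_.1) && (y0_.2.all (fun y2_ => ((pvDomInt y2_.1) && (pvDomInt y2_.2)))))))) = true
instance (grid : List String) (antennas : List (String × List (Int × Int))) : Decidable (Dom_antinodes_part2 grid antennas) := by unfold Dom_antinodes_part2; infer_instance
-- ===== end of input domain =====

-- B replaces A's scan of every grid cell against every antenna pair by, per pair,
-- a single walk along the grid columns (or rows) of the pair's reduced (gcd)
-- direction; same counted set of cells, asymptotically fewer steps.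

-- ===== PORT A =====
def pvCollinear (p1 p2 p3 : Int × Int) : Bool :=
  (p2.2 - p1.2) * (p3.1 - p2.1) == (p3.2 - p2.2) * (p2.1 - p1.1)

-- the 'for i, p1 in enumerate(positions): … break' loop of A
def pvALoop (x y : Int) (positions : List (Int × Int)) :
    List (Int × (Int × Int)) → PySem.Set (Int × Int) → PySem.Set (Int × Int)
  | [], s => s
  | (i, p1) :: rest, s =>
      if (PySem.List.slice positions (some (i + 1)) none).any
          (fun p2 => pvCollinear p1 p2 (x, y)) then
        PySem.Set.add s (x, y)
      else pvALoop x y positions rest s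

-- antennas.values() of a dict (unique keys) = the second components in order
def antinodes_part2 (grid : List String) (antennas : List (String × List (Int × Int))) : Int :=
  let antinodes : PySem.Set (Int × Int) :=
    (antennas.map (fun p => p.2)).foldl (fun s positions =>
      if positions.length < 2 then s
      else
        (PySem.List.pyRange 0 grid.length 1).foldl (fun s y =>
          -- grid[0] is only evaluated here, where the y-range guarantees grid ≠ []
          (PySem.List.pyRange 0 (PySem.Str.len (PySem.List.pyGetD grid 0 "")) 1).foldl (fun s x =>
            pvALoop x y positions (PySem.List.enumerate positions) s) s) s) []
  PySem.Set.len antinodes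

-- ===== PORT B =====
def pvBPair (W H : Int) (p1 p2 : Int × Int) (s : PySem.Set (Int × Int)) : PySem.Set (Int × Int) :=
  let dx := p2.1 - p1.1
  let dy := p2.2 - p1.2
  if dx = 0 ∧ dy = 0 then
    (PySem.List.pyRange 0 H 1).foldl (fun s y =>
      (PySem.List.pyRange 0 W 1).foldl (fun s x => PySem.Set.add s (x, y)) s) s
  else if dx = 0 then
    if 0 ≤ p2.1 ∧ p2.1 < W then
      (PySem.List.pyRange 0 H 1).foldl (fun s y => PySem.Set.add s (p2.1, y)) s
    else s
  else
    let g : Int := Int.gcd dx dy       -- math.gcd(abs(dx), abs(dy))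
    let sx := PySem.Int.floordiv dx g
    let sy := PySem.Int.floordiv dy g
    (PySem.List.pyRange 0 W 1).foldl (fun s x =>
      let r := x - p2.1
      if PySem.Int.mod r sx = 0 then
        let yv := p2.2 + PySem.Int.floordiv r sx * sy
        if 0 ≤ yv ∧ yv < H then PySem.Set.add s (x, yv) else s
      else s) s

def antinodes_part2_alt (grid : List String) (antennas : List (String × List (Int × Int))) : Int :=
  let H : Int := grid.length
  let W : Int := if H ≠ 0 then PySem.Str.len (PySem.List.pyGetD grid 0 "") else 0
  let marked : PySem.Set (Int × Int) :=
    (antennas.map (fun p => p.2)).foldl (fun s positions =>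
      let n : Int := positions.length
      (PySem.List.pyRange 0 n 1).foldl (fun s i =>
        let p1 := PySem.List.pyGetD positions i (0, 0)   -- positions[i], i always in range
        (PySem.List.pyRange (i + 1) n 1).foldl (fun s j =>
          let p2 := PySem.List.pyGetD positions j (0, 0) -- positions[j], j always in range
          pvBPair W H p1 p2 s) s) s) []
  PySem.Set.len marked

-- ===== PRECONDITION & SPEC =====
def Spec_antinodes_part2 (grid : List String) (antennas : List (String × List (Int × Int))) (out : Int) : Prop := out = antinodes_part2_alt grid antennas
instance (grid : List String) (antennas : List (String × List (Int × Int))) (out : Int) : Decidable (Spec_antinodes_part2 grid antennas out) := by unfold Spec_antinodes_part2; infer_instance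

-- ===== CLAIM (what is proved, stated in full; the proofs are below) =====
def Claim_equal_antinodes_part2 : Prop := ∀ (grid : List String) (antennas : List (String × List (Int × Int))), Dom_antinodes_part2 grid antennas → Spec_antinodes_part2 grid antennas (antinodes_part2 grid antennas)

-- ===== LEMMAS AND PROOFS =====

def pvInB (W H : Int) (q : Int × Int) : Prop := 0 ≤ q.1 ∧ q.1 < W ∧ 0 ≤ q.2 ∧ q.2 < H

theorem pv_mem_foldl {β γ : Type} (step : List γ → β → List γ) (P : β → γ → Prop)
    (h : ∀ s b q, q ∈ step s b ↔ q ∈ s ∨ P b q) :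
    ∀ (l : List β) (s : List γ) (q : γ), q ∈ l.foldl step s ↔ q ∈ s ∨ ∃ b ∈ l, P b q := by
  intro l
  induction l with
  | nil => simp
  | cons b t ih =>
      intro s q
      simp only [List.foldl_cons, ih, h, List.mem_cons]
      constructor
      · rintro ((hs | hP) | ⟨c, hc, hPc⟩)
        · exact Or.inl hs
        · exact Or.inr ⟨b, Or.inl rfl, hP⟩
        · exact Or.inr ⟨c, Or.inr hc, hPc⟩
      · rintro (hs | ⟨c, (rfl | hc), hPc⟩)
        · exact Or.inl (Or.inl hs)
        · exact Or.inl (Or.inr hPc)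
        · exact Or.inr ⟨c, hc, hPc⟩

theorem pv_mem_rect (W H : Int) (s : PySem.Set (Int × Int)) (q : Int × Int) :
    q ∈ (PySem.List.pyRange 0 H 1).foldl (fun s y =>
        (PySem.List.pyRange 0 W 1).foldl (fun s x => PySem.Set.add s (x, y)) s) s ↔
      q ∈ s ∨ pvInB W H q := by
  rw [pv_mem_foldl _ (fun y q => ∃ x ∈ PySem.List.pyRange 0 W 1, q = (x, y))
    (fun s y q => by
      rw [PySem.Set.mem_foldl_add (f := fun x => (x, y))])]
  simp only [PySem.List.mem_pyRange_one, pvInB]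
  constructor
  · rintro (hs | ⟨y, hy, x, hx, rfl⟩)
    · exact Or.inl hs
    · exact Or.inr ⟨hx.1, hx.2, hy.1, hy.2⟩
  · rintro (hs | ⟨h1, h2, h3, h4⟩)
    · exact Or.inl hs
    · exact Or.inr ⟨q.2, ⟨h3, h4⟩, q.1, ⟨h1, h2⟩, rfl⟩

theorem pv_line_param (dx dy r s : Int) (hdx : dx ≠ 0) :
    dy * r = s * dx ↔
      (PySem.Int.mod r (PySem.Int.floordiv dx (Int.gcd dx dy)) = 0 ∧
       s = PySem.Int.floordiv r (PySem.Int.floordiv dx (Int.gcd dx dy)) *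
             PySem.Int.floordiv dy (Int.gcd dx dy)) := by
  have hgnat : 0 < Int.gcd dx dy := Int.gcd_pos_of_ne_zero_left dy hdx
  set g : Int := (Int.gcd dx dy : Int) with hg
  have hg0 : 0 < g := by simp only [hg]; exact_mod_cast hgnat
  have hgx : g ∣ dx := Int.gcd_dvd_left dx dy
  have hgy : g ∣ dy := Int.gcd_dvd_right dx dy
  have hsx : PySem.Int.floordiv dx g = dx / g := PySem.Int.floordiv_eq_ediv_of_pos hg0
  have hsy : PySem.Int.floordiv dy g = dy / g := PySem.Int.floordiv_eq_ediv_of_pos hg0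
  set sx : Int := dx / g with hsxd
  set sy : Int := dy / g with hsyd
  have hx : sx * g = dx := Int.ediv_mul_cancel hgx
  have hy : sy * g = dy := Int.ediv_mul_cancel hgy
  have hsx0 : sx ≠ 0 := by
    intro h0; apply hdx; rw [← hx, h0, zero_mul]
  have hcop : Int.gcd sx sy = 1 := Int.gcd_div_gcd_div_gcd hgnat
  rw [hsx, hsy, PySem.Int.mod_eq_zero_iff_dvd]
  constructor
  · intro h
    have h2 : sy * r = s * sx := by
      apply mul_right_cancel₀ (ne_of_gt hg0)
      calc sy * r * g = dy * r := by rw [mul_right_comm, hy]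
        _ = s * dx := h
        _ = s * sx * g := by rw [mul_assoc, hx]
    have hdvd : sx ∣ r := by
      have : sx ∣ r * sy := ⟨s, by rw [mul_comm r sy, h2, mul_comm]⟩
      exact (Int.isCoprime_iff_gcd_eq_one.mpr hcop).dvd_of_dvd_mul_right this
    refine ⟨hdvd, ?_⟩
    have ht : PySem.Int.floordiv r sx * sx = r := by
      have := PySem.Int.floordiv_mul_add_mod r sx
      rw [(PySem.Int.mod_eq_zero_iff_dvd r sx).mpr hdvd, add_zero] at this
      exact this
    apply mul_right_cancel₀ hsx0
    calc s * sx = sy * r := h2.symm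
      _ = sy * (PySem.Int.floordiv r sx * sx) := by rw [ht]
      _ = PySem.Int.floordiv r sx * sy * sx := by ring
  · rintro ⟨hdvd, hs⟩
    have ht : PySem.Int.floordiv r sx * sx = r := by
      have := PySem.Int.floordiv_mul_add_mod r sx
      rw [(PySem.Int.mod_eq_zero_iff_dvd r sx).mpr hdvd, add_zero] at this
      exact this
    rw [hs]
    calc dy * r = sy * g * (PySem.Int.floordiv r sx * sx) := by rw [hy, ht]
      _ = PySem.Int.floordiv r sx * sy * (sx * g) := by ring
      _ = PySem.Int.floordiv r sx * sy * dx := by rw [hx]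

theorem pv_mem_pvBPair (W H : Int) (p1 p2 q : Int × Int) (s : PySem.Set (Int × Int)) :
    q ∈ pvBPair W H p1 p2 s ↔ q ∈ s ∨ (pvInB W H q ∧ pvCollinear p1 p2 q = true) := by
  simp only [pvBPair]
  split_ifs with h1 h2 h3
  · -- dx = 0 ∧ dy = 0
    rw [pv_mem_rect]
    have hc : pvCollinear p1 p2 q = true := by
      simp only [pvCollinear, h1.1, h1.2, beq_iff_eq]
      ring
    simp [hc]
  · -- dx = 0, dy ≠ 0, p2.1 in range
    have hdy : p2.2 - p1.2 ≠ 0 := by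
      intro h; exact h1 ⟨h2, h⟩
    rw [PySem.Set.mem_foldl_add (f := fun y => (p2.1, y))]
    have hc : ∀ (x : Int × Int), (pvCollinear p1 p2 x = true) ↔ x.1 = p2.1 := by
      intro x
      simp only [pvCollinear, beq_iff_eq]
      rw [show p2.1 - p1.1 = 0 from h2]
      constructor
      · intro h
        rcases mul_eq_zero.mp (by rw [h]; ring) with h' | h'
        · exact absurd h' hdy
        · omega
      · intro h; rw [h]; ring
    simp only [PySem.List.mem_pyRange_one, hc, pvInB]
    constructor
    · rintro (hs | ⟨y, hy, rfl⟩)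
      · exact Or.inl hs
      · exact Or.inr ⟨⟨h3.1, h3.2, hy.1, hy.2⟩, rfl⟩
    · rintro (hs | ⟨⟨b1, b2, b3, b4⟩, hx⟩)
      · exact Or.inl hs
      · refine Or.inr ⟨q.2, ⟨b3, b4⟩, ?_⟩
        exact Prod.ext hx rfl
  · -- dx = 0, dy ≠ 0, p2.1 out of range
    have hdy : p2.2 - p1.2 ≠ 0 := by intro h; exact h1 ⟨h2, h⟩
    have hc : ∀ (x : Int × Int), (pvCollinear p1 p2 x = true) ↔ x.1 = p2.1 := by
      intro x
      simp only [pvCollinear, beq_iff_eq]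
      rw [show p2.1 - p1.1 = 0 from h2]
      constructor
      · intro h
        rcases mul_eq_zero.mp (by rw [h]; ring) with h' | h'
        · exact absurd h' hdy
        · omega
      · intro h; rw [h]; ring
    simp only [pvInB, hc]
    constructor
    · exact Or.inl
    · rintro (hs | ⟨⟨b1, b2, b3, b4⟩, hx⟩)
      · exact hs
      · exact absurd ⟨by omega, by omega⟩ h3
  · -- dx ≠ 0
    have hdx : p2.1 - p1.1 ≠ 0 := h2
    rw [pv_mem_foldl _ (fun x q =>
        PySem.Int.mod (x - p2.1) (PySem.Int.floordiv (p2.1 - p1.1) (Int.gcd (p2.1 - p1.1) (p2.2 - p1.2))) = 0 ∧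
        (0 ≤ p2.2 + PySem.Int.floordiv (x - p2.1) (PySem.Int.floordiv (p2.1 - p1.1) (Int.gcd (p2.1 - p1.1) (p2.2 - p1.2))) * PySem.Int.floordiv (p2.2 - p1.2) (Int.gcd (p2.1 - p1.1) (p2.2 - p1.2)) ∧
         p2.2 + PySem.Int.floordiv (x - p2.1) (PySem.Int.floordiv (p2.1 - p1.1) (Int.gcd (p2.1 - p1.1) (p2.2 - p1.2))) * PySem.Int.floordiv (p2.2 - p1.2) (Int.gcd (p2.1 - p1.1) (p2.2 - p1.2)) < H) ∧
        q = (x, p2.2 + PySem.Int.floordiv (x - p2.1) (PySem.Int.floordiv (p2.1 - p1.1) (Int.gcd (p2.1 - p1.1) (p2.2 - p1.2))) * PySem.Int.floordiv (p2.2 - p1.2) (Int.gcd (p2.1 - p1.1) (p2.2 - p1.2))))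
      (fun s x q => by
        dsimp only
        split_ifs with c1 c2
        · simp only [PySem.Set.mem_add]; tauto
        · simp; tauto
        · simp; tauto)]
    have hcol : pvCollinear p1 p2 q = true ↔
        (p2.2 - p1.2) * (q.1 - p2.1) = (q.2 - p2.2) * (p2.1 - p1.1) := by
      simp [pvCollinear]
    constructor
    · rintro (hs | ⟨x, hx, c1, c2, rfl⟩)
      · exact Or.inl hs
      · rw [PySem.List.mem_pyRange_one] at hx
        refine Or.inr ⟨⟨hx.1, hx.2, c2.1, c2.2⟩, ?_⟩
        rw [hcol]
        exact (pv_line_param (p2.1 - p1.1) (p2.2 - p1.2) (x - p2.1) _ hdx).mpr ⟨c1, by ring⟩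
    · rintro (hs | ⟨⟨b1, b2, b3, b4⟩, hc⟩)
      · exact Or.inl hs
      · rw [hcol] at hc
        obtain ⟨c1, c2⟩ := (pv_line_param (p2.1 - p1.1) (p2.2 - p1.2) (q.1 - p2.1) (q.2 - p2.2) hdx).mp hc
        refine Or.inr ⟨q.1, PySem.List.mem_pyRange_one.mpr ⟨b1, b2⟩, c1, ⟨by omega, by omega⟩, ?_⟩
        exact Prod.ext rfl (by omega)

def pvHasPair (ps : List (Int × Int)) (q : Int × Int) : Prop :=
  ∃ (k : Nat) (hk : k < ps.length), ∃ p2 ∈ ps.drop (k + 1), pvCollinear ps[k] p2 q = true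

theorem pv_mem_drop {α : Type} (ps : List α) (m : Nat) (p : α) :
    p ∈ ps.drop m ↔ ∃ (j : Nat) (h : j < ps.length), m ≤ j ∧ ps[j] = p := by
  rw [List.mem_iff_getElem]
  constructor
  · rintro ⟨i, hi, hp⟩
    rw [List.length_drop] at hi
    refine ⟨m + i, by omega, by omega, ?_⟩
    rw [← List.getElem_drop]
    exact hp
  · rintro ⟨j, hj, hm, hp⟩
    refine ⟨j - m, by rw [List.length_drop]; omega, ?_⟩
    rw [List.getElem_drop]
    simp only [show m + (j - m) = j by omega]
    exact hp

theorem pv_mem_Bgroup (W H : Int) (ps : List (Int × Int)) (s : PySem.Set (Int × Int)) (q : Int × Int) :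
    q ∈ (PySem.List.pyRange 0 (ps.length : Int) 1).foldl (fun s i =>
        (PySem.List.pyRange (i + 1) (ps.length : Int) 1).foldl (fun s j =>
          pvBPair W H (PySem.List.pyGetD ps i (0, 0)) (PySem.List.pyGetD ps j (0, 0)) s) s) s ↔
      q ∈ s ∨ (pvInB W H q ∧ pvHasPair ps q) := by
  rw [pv_mem_foldl _ (fun i q => ∃ j ∈ PySem.List.pyRange (i + 1) (ps.length : Int) 1,
        pvInB W H q ∧ pvCollinear (PySem.List.pyGetD ps i (0, 0)) (PySem.List.pyGetD ps j (0, 0)) q = true)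
    (fun s i q => by
      rw [pv_mem_foldl _ (fun j q => pvInB W H q ∧
            pvCollinear (PySem.List.pyGetD ps i (0, 0)) (PySem.List.pyGetD ps j (0, 0)) q = true)
        (fun s j q => pv_mem_pvBPair W H _ _ q s)])]
  constructor
  · rintro (hs | ⟨i, hi, j, hj, hb, hc⟩)
    · exact Or.inl hs
    · rw [PySem.List.mem_pyRange_one] at hi hj
      refine Or.inr ⟨hb, i.toNat, by omega, ?_⟩
      refine ⟨PySem.List.pyGetD ps j (0, 0), ?_, ?_⟩
      · rw [pv_mem_drop]
        refine ⟨j.toNat, by omega, by omega, ?_⟩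
        rw [PySem.List.pyGetD_eq_getElem ps (0, 0) (by omega) (by exact_mod_cast hj.2)]
      · rw [← PySem.List.pyGetD_eq_getElem ps (0, 0) (by omega) (by exact_mod_cast hi.2)]
        exact hc
  · rintro (hs | ⟨hb, k, hk, p2, hp2, hc⟩)
    · exact Or.inl hs
    · rw [pv_mem_drop] at hp2
      obtain ⟨j, hj, hkj, rfl⟩ := hp2
      refine Or.inr ⟨(k : Int), PySem.List.mem_pyRange_one.mpr ⟨by omega, by exact_mod_cast hk⟩,
        (j : Int), PySem.List.mem_pyRange_one.mpr ⟨by omega, by exact_mod_cast hj⟩, hb, ?_⟩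
      rw [PySem.List.pyGetD_eq_getElem ps (0, 0) (i := (k : Int)) (by omega) (by exact_mod_cast hk),
          PySem.List.pyGetD_eq_getElem ps (0, 0) (i := (j : Int)) (by omega) (by exact_mod_cast hj)]
      simpa using hc

theorem pv_hasPair_len (ps : List (Int × Int)) (q : Int × Int) (h : pvHasPair ps q) :
    2 ≤ ps.length := by
  obtain ⟨k, hk, p2, hp2, -⟩ := h
  rw [pv_mem_drop] at hp2
  obtain ⟨j, hj, hkj, -⟩ := hp2
  omega

theorem pv_mem_ALoop (x y : Int) (ps : List (Int × Int)) :
    ∀ (L : List (Int × (Int × Int))) (s : PySem.Set (Int × Int)) (q : Int × Int),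
    q ∈ pvALoop x y ps L s ↔ q ∈ s ∨ (q = (x, y) ∧ ∃ ip ∈ L,
      (PySem.List.slice ps (some (ip.1 + 1)) none).any
        (fun p2 => pvCollinear ip.2 p2 (x, y)) = true) := by
  intro L
  induction L with
  | nil => simp [pvALoop]
  | cons ip t ih =>
      intro s q
      obtain ⟨i, p1⟩ := ip
      simp only [pvALoop]
      split_ifs with h
      · simp only [PySem.Set.mem_add, List.mem_cons]
        constructor
        · rintro (hs | rfl)
          · exact Or.inl hs
          · exact Or.inr ⟨rfl, (i, p1), Or.inl rfl, h⟩
        · rintro (hs | ⟨rfl, ip', (rfl | hip'), hany⟩)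
          · exact Or.inl hs
          · exact Or.inr rfl
          · exact Or.inr rfl
      · rw [ih]
        simp only [List.mem_cons]
        constructor
        · rintro (hs | ⟨rfl, ip', hip', hany⟩)
          · exact Or.inl hs
          · exact Or.inr ⟨rfl, ip', Or.inr hip', hany⟩
        · rintro (hs | ⟨rfl, ip', (rfl | hip'), hany⟩)
          · exact Or.inl hs
          · exact absurd hany h
          · exact Or.inr ⟨rfl, ip', hip', hany⟩

theorem pv_mem_ALoop_enum (x y : Int) (ps : List (Int × Int)) (s : PySem.Set (Int × Int)) (q : Int × Int) :
    q ∈ pvALoop x y ps (PySem.List.enumerate ps) s ↔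
      q ∈ s ∨ (q = (x, y) ∧ pvHasPair ps (x, y)) := by
  rw [pv_mem_ALoop]
  have : (∃ ip ∈ PySem.List.enumerate ps,
      (PySem.List.slice ps (some (ip.1 + 1)) none).any
        (fun p2 => pvCollinear ip.2 p2 (x, y)) = true) ↔ pvHasPair ps (x, y) := by
    constructor
    · rintro ⟨ip, hip, hany⟩
      rw [PySem.List.mem_enumerate_iff] at hip
      obtain ⟨k, hk, rfl⟩ := hip
      simp only [zero_add] at hany ⊢
      rw [show ((k : Int) + 1) = ((k + 1 : Nat) : Int) by push_cast; ring,
        PySem.List.slice_from_natCast] at hany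
      rw [List.any_eq_true] at hany
      obtain ⟨p2, hp2, hc⟩ := hany
      exact ⟨k, hk, p2, hp2, by simpa using hc⟩
    · rintro ⟨k, hk, p2, hp2, hc⟩
      refine ⟨((k : Int), ps[k]), ?_, ?_⟩
      · rw [PySem.List.mem_enumerate_iff]
        exact ⟨k, hk, by simp⟩
      · rw [show ((k : Int) + 1) = ((k + 1 : Nat) : Int) by push_cast; ring,
          PySem.List.slice_from_natCast]
        rw [List.any_eq_true]
        exact ⟨p2, hp2, by simpa using hc⟩
  rw [this]

theorem pv_mem_Agroup (W H : Int) (ps : List (Int × Int)) (s : PySem.Set (Int × Int)) (q : Int × Int) :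
    q ∈ (PySem.List.pyRange 0 H 1).foldl (fun s y =>
        (PySem.List.pyRange 0 W 1).foldl (fun s x =>
          pvALoop x y ps (PySem.List.enumerate ps) s) s) s ↔
      q ∈ s ∨ (pvInB W H q ∧ pvHasPair ps q) := by
  rw [pv_mem_foldl _ (fun y q => ∃ x ∈ PySem.List.pyRange 0 W 1,
        q = (x, y) ∧ pvHasPair ps (x, y))
    (fun s y q => by
      rw [pv_mem_foldl _ (fun x q => q = (x, y) ∧ pvHasPair ps (x, y))
        (fun s x q => pv_mem_ALoop_enum x y ps s q)])]
  constructor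
  · rintro (hs | ⟨y, hy, x, hx, rfl, hp⟩)
    · exact Or.inl hs
    · rw [PySem.List.mem_pyRange_one] at hy hx
      exact Or.inr ⟨⟨hx.1, hx.2, hy.1, hy.2⟩, hp⟩
  · rintro (hs | ⟨⟨b1, b2, b3, b4⟩, hp⟩)
    · exact Or.inl hs
    · refine Or.inr ⟨q.2, PySem.List.mem_pyRange_one.mpr ⟨b3, b4⟩,
        q.1, PySem.List.mem_pyRange_one.mpr ⟨b1, b2⟩, rfl, ?_⟩
      simpa using hp

theorem pv_nodup_foldl {β γ : Type} (step : List γ → β → List γ)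
    (h : ∀ s b, s.Nodup → (step s b).Nodup) :
    ∀ (l : List β) (s : List γ), s.Nodup → (l.foldl step s).Nodup := by
  intro l
  induction l with
  | nil => intro s hs; simpa using hs
  | cons b t ih => intro s hs; exact ih _ (h s b hs)

theorem pv_nodup_pvBPair (W H : Int) (p1 p2 : Int × Int) (s : PySem.Set (Int × Int))
    (hs : s.Nodup) : (pvBPair W H p1 p2 s).Nodup := by
  simp only [pvBPair]
  split_ifs with h1 h2 h3
  · refine pv_nodup_foldl _ (fun s y hy => ?_) _ _ hs
    exact pv_nodup_foldl _ (fun s x hx => PySem.Set.nodup_add _ _ hx) _ _ hy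
  · exact pv_nodup_foldl _ (fun s y hy => PySem.Set.nodup_add _ _ hy) _ _ hs
  · exact hs
  · refine pv_nodup_foldl _ (fun s x hx => ?_) _ _ hs
    dsimp only
    split_ifs with c1 c2
    · exact PySem.Set.nodup_add _ _ hx
    · exact hx
    · exact hx

theorem pv_nodup_ALoop (x y : Int) (ps : List (Int × Int)) :
    ∀ (L : List (Int × (Int × Int))) (s : PySem.Set (Int × Int)),
    s.Nodup → (pvALoop x y ps L s).Nodup := by
  intro L
  induction L with
  | nil => intro s hs; simpa [pvALoop] using hs
  | cons ip t ih =>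
      intro s hs
      obtain ⟨i, p1⟩ := ip
      simp only [pvALoop]
      split_ifs with h
      · exact PySem.Set.nodup_add _ _ hs
      · exact ih _ hs

-- ===== VERDICT (by name: the statement is the Claim_ definition above) =====
theorem antinodes_part2_spec : Claim_equal_antinodes_part2 := by
  intro grid antennas _
  unfold Spec_antinodes_part2 antinodes_part2 antinodes_part2_alt
  set gs := antennas.map (fun p => p.2) with hgs
  set HA : Int := (grid.length : Int) with hHA
  set WA : Int := PySem.Str.len (PySem.List.pyGetD grid 0 "") with hWA
  set WB : Int := if HA ≠ 0 then WA else 0 with hWB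
  set stepA : PySem.Set (Int × Int) → List (Int × Int) → PySem.Set (Int × Int) :=
    fun s positions =>
      if positions.length < 2 then s
      else
        (PySem.List.pyRange 0 HA 1).foldl (fun s y =>
          (PySem.List.pyRange 0 WA 1).foldl (fun s x =>
            pvALoop x y positions (PySem.List.enumerate positions) s) s) s with hstepA
  set stepB : PySem.Set (Int × Int) → List (Int × Int) → PySem.Set (Int × Int) :=
    fun s positions =>
      (PySem.List.pyRange 0 (positions.length : Int) 1).foldl (fun s i =>
        (PySem.List.pyRange (i + 1) (positions.length : Int) 1).foldl (fun s j =>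
          pvBPair WB HA (PySem.List.pyGetD positions i (0, 0)) (PySem.List.pyGetD positions j (0, 0)) s) s) s with hstepB
  show PySem.Set.len (gs.foldl stepA []) = PySem.Set.len (gs.foldl stepB [])
  have hstepAmem : ∀ s b q, q ∈ stepA s b ↔ q ∈ s ∨ (pvInB WA HA q ∧ pvHasPair b q) := by
    intro s b q
    rw [hstepA]
    dsimp only
    split_ifs with h
    · constructor
      · exact Or.inl
      · rintro (hs | ⟨-, hp⟩)
        · exact hs
        · exact absurd (pv_hasPair_len _ _ hp) (by omega)
    · exact pv_mem_Agroup WA HA b s q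
  have hstepBmem : ∀ s b q, q ∈ stepB s b ↔ q ∈ s ∨ (pvInB WB HA q ∧ pvHasPair b q) := by
    intro s b q
    rw [hstepB]
    exact pv_mem_Bgroup WB HA b s q
  have hnA : (gs.foldl stepA []).Nodup := by
    refine pv_nodup_foldl _ (fun s b hb => ?_) _ _ List.nodup_nil
    rw [hstepA]
    dsimp only
    split_ifs with h
    · exact hb
    · refine pv_nodup_foldl _ (fun s y hy => ?_) _ _ hb
      exact pv_nodup_foldl _ (fun s x hx => pv_nodup_ALoop _ _ _ _ _ hx) _ _ hy
  have hnB : (gs.foldl stepB []).Nodup := by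
    refine pv_nodup_foldl _ (fun s b hb => ?_) _ _ List.nodup_nil
    rw [hstepB]
    refine pv_nodup_foldl _ (fun s i hi => ?_) _ _ hb
    exact pv_nodup_foldl _ (fun s j hj => pv_nodup_pvBPair _ _ _ _ _ hj) _ _ hi
  have hWH : ∀ q, pvInB WA HA q ↔ pvInB WB HA q := by
    intro q
    by_cases hg : HA ≠ 0
    · rw [hWB]
      simp [hg]
    · simp only [ne_eq, not_not] at hg
      simp only [pvInB, hg]
      constructor
      · rintro ⟨-, -, h3, h4⟩; omega
      · rintro ⟨-, -, h3, h4⟩; omega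
  have hperm : (gs.foldl stepA []).Perm (gs.foldl stepB []) := by
    rw [List.perm_ext_iff_of_nodup hnA hnB]
    intro q
    rw [pv_mem_foldl stepA _ hstepAmem, pv_mem_foldl stepB _ hstepBmem]
    simp only [List.not_mem_nil, false_or]
    constructor
    · rintro ⟨ps, hps, hb, hp⟩
      exact ⟨ps, hps, (hWH q).mp hb, hp⟩
    · rintro ⟨ps, hps, hb, hp⟩
      exact ⟨ps, hps, (hWH q).mpr hb, hp⟩
  simp only [PySem.Set.len, hperm.length_eq]
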